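-- pv_equiv track=rewrite | github.com/jtyun/accypdf | pdf_stats.py | whitespace_counter
-- ===== SOURCE A (Python) =====
-- def whitespace_counter(s,threshold):
--     whites=[]
--     counter=0
--     s=s[0]
--     for i in range(len(s)):
--
--         if (s[i]==' '):
--             counter=counter+1
--             if(i==len(s)-1):
--                 whites.append(counter)
--             continue
--         if (counter!=0):
--             whites.append(counter)
--             counter=0
--     return [i for i in whites if i>threshold]
-- ===== SOURCE B (Python) =====
-- def whitespace_counter(s, threshold):
--     t = s[0]
--     result = []
--     rest = t
--     while rest:
--         if rest[0] == ' ':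
--             stripped = rest.lstrip(' ')
--             run = len(rest) - len(stripped)
--             if run > threshold:
--                 result.append(run)
--             rest = stripped
--         else:
--             rest = rest[1:]
--     return result
-- ===== Notes on version B (the rewrite author's own statement) =====
-- stated objective: simpler
-- what changed: Replaced the index loop with running counter, transition detection and special trailing-run append by direct run-at-a-time scanning: at each space, strip the whole run with lstrip, emit its length if above threshold, and continue after it.
import Mathlib
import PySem

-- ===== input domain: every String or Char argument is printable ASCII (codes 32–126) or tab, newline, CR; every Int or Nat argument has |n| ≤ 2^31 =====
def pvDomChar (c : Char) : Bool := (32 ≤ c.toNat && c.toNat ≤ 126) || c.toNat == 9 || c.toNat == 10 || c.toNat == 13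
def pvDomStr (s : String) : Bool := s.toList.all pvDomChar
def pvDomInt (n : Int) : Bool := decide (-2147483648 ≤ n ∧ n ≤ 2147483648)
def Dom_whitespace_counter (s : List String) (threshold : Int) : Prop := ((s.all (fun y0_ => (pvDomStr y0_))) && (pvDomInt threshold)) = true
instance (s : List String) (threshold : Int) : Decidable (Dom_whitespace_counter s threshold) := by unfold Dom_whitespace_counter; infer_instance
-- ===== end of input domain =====

-- B scans run-at-a-time (strip each space run with lstrip, emit its length if above threshold)
-- instead of A's per-index counter with transition detection and trailing-run special case; objective: simpler.


-- ===== PORT A =====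
-- body of A's `for i in range(len(s))` loop over the char list `cs`; state = (whites, counter)
def wcStep (cs : List Char) (st : List Int × Int) (i : Nat) : List Int × Int :=
  if cs.getD i ' ' = ' ' then
    let counter := st.2 + 1
    if i = cs.length - 1 then (st.1 ++ [counter], counter) else (st.1, counter)
  else
    if st.2 ≠ 0 then (st.1 ++ [st.2], (0 : Int)) else (st.1, st.2)

def whitespace_counter (s : List String) (threshold : Int) : List Int :=
  -- `s = s[0]`: IndexError on the empty list is excluded by Pre_; `getD ""` is a total-default there
  let t : String := (PySem.List.pyGet? s 0).getD ""
  let cs := t.toList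
  let st := (List.range cs.length).foldl (wcStep cs) ([], 0)
  st.1.filter (fun i => threshold < i)

-- ===== PORT B =====
-- B's while loop: at a space, strip the whole run (`lstrip(' ')` = dropWhile), emit its length if
-- above threshold, continue after the run; at a non-space, step one character
def wcAltGo (threshold : Int) : List Char → List Int
  | [] => []
  | c :: cs =>
    if h : c = ' ' then
      let stripped := List.dropWhile (fun x => x = ' ') (c :: cs)
      let run : Int := ((c :: cs).length - stripped.length : Nat)
      if threshold < run then run :: wcAltGo threshold stripped
      else wcAltGo threshold stripped
    else wcAltGo threshold cs
termination_by l => l.length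
decreasing_by
  · simp [List.dropWhile, h]
    exact List.length_dropWhile_le _ _
  · simp [List.dropWhile, h]
    exact List.length_dropWhile_le _ _
  · simp

def whitespace_counter_alt (s : List String) (threshold : Int) : List Int :=
  let t : String := (PySem.List.pyGet? s 0).getD ""
  wcAltGo threshold t.toList

-- ===== PRECONDITION & SPEC =====
-- A raises IndexError on s = [] (from `s[0]`); B raises there too, so the empty list is outside Pre_.
def Pre_whitespace_counter (s : List String) (threshold : Int) : Prop := s ≠ []
instance (s : List String) (threshold : Int) : Decidable (Pre_whitespace_counter s threshold) := by unfold Pre_whitespace_counter; infer_instance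
def pvWitness_whitespace_counter : List String × Int := (["a  b "], 1)

def Spec_whitespace_counter (s : List String) (threshold : Int) (out : List Int) : Prop := out = whitespace_counter_alt s threshold
instance (s : List String) (threshold : Int) (out : List Int) : Decidable (Spec_whitespace_counter s threshold out) := by unfold Spec_whitespace_counter; infer_instance

-- ===== CLAIM (what is proved, stated in full; the proofs are below) =====
def Claim_equal_whitespace_counter : Prop := ∀ (s : List String) (threshold : Int), Dom_whitespace_counter s threshold → Pre_whitespace_counter s threshold → Spec_whitespace_counter s threshold (whitespace_counter s threshold)

-- ===== LEMMAS AND PROOFS =====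

-- reference recursion: the run lengths A's loop appends, given the running counter
def wcRuns : List Char → Int → List Int
  | [], _ => []
  | c :: rest, counter =>
    if c = ' ' then
      if rest = [] then [counter + 1] else wcRuns rest (counter + 1)
    else
      if counter ≠ 0 then counter :: wcRuns rest 0 else wcRuns rest 0

theorem wcRuns_head_space : ∀ (cs : List Char) (counter : Int), 0 ≤ counter →
    cs.head? = some ' ' →
    wcRuns cs counter =
      (counter + ((cs.takeWhile (fun x => x = ' ')).length : Int)) ::
        wcRuns (cs.dropWhile (fun x => x = ' ')) 0 := by
  intro cs
  induction cs with
  | nil => intro counter _ h; simp at h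
  | cons c rest ih =>
    intro counter hc hh
    simp only [List.head?_cons, Option.some.injEq] at hh
    subst hh
    match rest with
    | [] => simp [wcRuns]
    | r :: rs =>
      by_cases hr : r = ' '
      · subst hr
        rw [show wcRuns (' ' :: ' ' :: rs) counter = wcRuns (' ' :: rs) (counter + 1) by
          simp [wcRuns]]
        rw [ih (counter + 1) (by omega) (by simp)]
        simp
        omega
      · rw [show wcRuns (' ' :: r :: rs) counter = wcRuns (r :: rs) (counter + 1) by
          simp [wcRuns]]
        rw [show wcRuns (r :: rs) (counter + 1) = (counter + 1) :: wcRuns rs 0 by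
          simp [wcRuns, hr]; omega]
        simp [hr, wcRuns]

theorem wcFold (cs : List Char) : ∀ (k j : Nat) (whites : List Int) (counter : Int),
    j + k = cs.length →
    ((List.range' j k).foldl (wcStep cs) (whites, counter)).1
      = whites ++ wcRuns (cs.drop j) counter := by
  intro k
  induction k with
  | zero =>
    intro j whites counter hj
    simp [List.drop_eq_nil_of_le (by omega : cs.length ≤ j), wcRuns]
  | succ m ih =>
    intro j whites counter hj
    have hjlt : j < cs.length := by omega
    rw [List.range'_succ, List.foldl_cons]
    rw [List.drop_eq_getElem_cons hjlt]
    have hget : cs.getD j ' ' = cs[j]'hjlt := List.getD_eq_getElem cs ' ' hjlt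
    by_cases hsp : cs[j]'hjlt = ' '
    · by_cases hlast : j = cs.length - 1
      · have hm : m = 0 := by omega
        subst hm
        have hdrop : cs.drop (j+1) = [] := List.drop_eq_nil_of_le (by omega)
        rw [show wcStep cs (whites, counter) j = (whites ++ [counter + 1], counter + 1) by
          simp only [wcStep]; rw [hget, if_pos hsp, if_pos hlast]]
        simp [wcRuns, hsp, hdrop]
      · have hne : cs.drop (j+1) ≠ [] := by
          intro h
          have := List.drop_eq_nil_iff.mp h
          omega
        rw [show wcStep cs (whites, counter) j = (whites, counter + 1) by
          simp only [wcStep]; rw [hget, if_pos hsp, if_neg hlast]]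
        rw [ih (j+1) whites (counter+1) (by omega)]
        simp [wcRuns, hsp, hne]
    · rw [show wcRuns (cs[j]'hjlt :: cs.drop (j+1)) counter
          = if counter ≠ 0 then counter :: wcRuns (cs.drop (j+1)) 0 else wcRuns (cs.drop (j+1)) counter by
        by_cases hc : counter = 0 <;> simp [wcRuns, hsp, hc]]
      by_cases hc : counter = 0
      · rw [show wcStep cs (whites, counter) j = (whites, counter) by
          simp only [wcStep]; rw [hget, if_neg hsp, if_neg (by simp [hc])]]
        rw [ih (j+1) whites counter (by omega)]
        simp [hc]
      · rw [show wcStep cs (whites, counter) j = (whites ++ [counter], 0) by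
          simp only [wcStep]; rw [hget, if_neg hsp, if_pos (by simp [hc])]]
        rw [ih (j+1) (whites ++ [counter]) 0 (by omega)]
        simp [hc]

theorem wcAltGo_eq (threshold : Int) : (cs : List Char) →
    wcAltGo threshold cs = (wcRuns cs 0).filter (fun i => threshold < i)
  | [] => by simp [wcAltGo, wcRuns]
  | c :: rest => by
    by_cases h : c = ' '
    · subst h
      have hrec := wcAltGo_eq threshold (List.dropWhile (fun x => x = ' ') (' ' :: rest))
      have hlen : ((' ' :: rest).length - (List.dropWhile (fun x => x = ' ') (' ' :: rest)).length : Nat)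
          = (List.takeWhile (fun x => x = ' ') (' ' :: rest)).length := by
        have : (List.takeWhile (fun x => (x = ' ' : Bool)) (' ' :: rest)).length
            + (List.dropWhile (fun x => (x = ' ' : Bool)) (' ' :: rest)).length = (' ' :: rest).length := by
          rw [← List.length_append, List.takeWhile_append_dropWhile]
        omega
      rw [wcRuns_head_space _ 0 le_rfl (by simp)]
      rw [show wcAltGo threshold (' ' :: rest)
          = if threshold < (((' ' :: rest).length - (List.dropWhile (fun x => x = ' ') (' ' :: rest)).length : Nat) : Int)
            then (((' ' :: rest).length - (List.dropWhile (fun x => x = ' ') (' ' :: rest)).length : Nat) : Int)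
              :: wcAltGo threshold (List.dropWhile (fun x => x = ' ') (' ' :: rest))
            else wcAltGo threshold (List.dropWhile (fun x => x = ' ') (' ' :: rest)) by
        simp [wcAltGo]]
      rw [hlen, hrec]
      by_cases ht : threshold < ((List.takeWhile (fun x => x = ' ') (' ' :: rest)).length : Int) <;>
        simp [List.filter_cons, ht]
    · have hrec := wcAltGo_eq threshold rest
      rw [show wcAltGo threshold (c :: rest) = wcAltGo threshold rest by simp [wcAltGo, h]]
      rw [show wcRuns (c :: rest) 0 = wcRuns rest 0 by simp [wcRuns, h]]
      exact hrec
termination_by cs => cs.length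
decreasing_by
  all_goals simp [List.dropWhile]
  all_goals try exact List.length_dropWhile_le _ _

-- ===== VERDICT (by name: the statement is the Claim_ definition above) =====
theorem whitespace_counter_spec : Claim_equal_whitespace_counter := by
  intro s threshold _ _
  unfold Spec_whitespace_counter whitespace_counter whitespace_counter_alt
  have h := wcFold ((PySem.List.pyGet? s 0).getD "").toList
      ((PySem.List.pyGet? s 0).getD "").toList.length 0 [] 0 (by simp)
  simp only [List.range_eq_range'] at *
  rw [h]
  simp [wcAltGo_eq]
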